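-- pv_equiv track=rewrite | github.com/TG-Techie/CodeRypl | code_rypl/renderers/tools.py | normalize_sports
-- ===== SOURCE A (Python) =====
-- sport_abrev_to_formal_name = {
--     "hky": "Hockey",
--     "bball": "Basketball",
--     "soc": "Soccer",
--     "baseb": "Baseball",
--     "softb": "Softball",
--     "lax": "Lacrosse",
--     "fb": "Football",
--     "fhky": "Field Hockey",
-- }
--
-- def strip_escape(string: str) -> str:
--     """
--     Strips escape characters from a string.
--     """
--     return string.lstrip(":").strip()
--
-- def isescaped(string: str) -> bool:
--     """
--     Checks if a string is an escape character.
--     """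
--     return string.startswith(":")
--
-- def matchify(string: str) -> str:
--     """
--     Converts a string to a form without whitespace or caps so it can be
--     mathced against a list or set of strings regardless of input case / formatting.
--     """
--     return "".join(
--         map(
--             str.lower,
--             string.split(),
--         )
--     )
--
-- def normalize_sports(sport: str) -> None | str:
--
--     # if the starts starts with a colon then only stip (including the space after the colon)
--     if isescaped(sport):
--         return ":" + strip_escape(sport)
--
--     matchable = matchify(sport)
--
--     # if the sport a value in the known_sport_abbrevs then return the key
--     for abbrev, full_name in sport_abrev_to_formal_name.items():
--         if matchable in {abbrev, matchify(full_name)}: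
--             return full_name
--     else:
--         return None
-- ===== SOURCE B (Python) =====
-- # Sorted table of (match key, formal name); a recursive binary search over it
-- # replaces A's linear scan (which builds a set and re-matchifies every entry).
-- _table = [
--     ("baseb", "Baseball"), ("baseball", "Baseball"), ("basketball", "Basketball"),
--     ("bball", "Basketball"), ("fb", "Football"), ("fhky", "Field Hockey"),
--     ("fieldhockey", "Field Hockey"), ("football", "Football"), ("hky", "Hockey"),
--     ("hockey", "Hockey"), ("lacrosse", "Lacrosse"), ("lax", "Lacrosse"),
--     ("soc", "Soccer"), ("soccer", "Soccer"), ("softb", "Softball"),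
--     ("softball", "Softball"),
-- ]
--
-- def _bsearch(m, lo, hi):
--     if hi <= lo:
--         return None
--     mid = (lo + hi) // 2
--     key, name = _table[mid]
--     if m == key:
--         return name
--     if m < key:
--         return _bsearch(m, lo, mid)
--     return _bsearch(m, mid + 1, hi)
--
-- def normalize_sports(sport: str) -> None | str:
--     if sport.startswith(":"):
--         return ":" + sport.lstrip(":").strip()
--     return _bsearch("".join(sport.split()).lower(), 0, len(_table))
-- ===== Notes on version B (the rewrite author's own statement) =====
-- stated objective: alternative
-- what changed: Replaces A's linear scan of the abbreviation dict (building a two-element set and re-matchifying each full name per iteration) with a recursive binary search over a precomputed sorted table mapping every abbreviation and matchified full name to its formal name.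
import Mathlib
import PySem

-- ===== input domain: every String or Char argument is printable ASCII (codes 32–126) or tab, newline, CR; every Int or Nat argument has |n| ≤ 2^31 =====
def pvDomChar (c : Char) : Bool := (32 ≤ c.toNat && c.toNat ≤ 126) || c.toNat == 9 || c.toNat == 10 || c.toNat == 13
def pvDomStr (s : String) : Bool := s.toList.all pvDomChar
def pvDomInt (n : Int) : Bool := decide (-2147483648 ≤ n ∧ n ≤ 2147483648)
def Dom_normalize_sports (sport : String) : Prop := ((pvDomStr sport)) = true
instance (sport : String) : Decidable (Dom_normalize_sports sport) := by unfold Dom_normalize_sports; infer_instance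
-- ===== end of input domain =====

-- B replaces A's linear scan of the abbreviation dict by a recursive binary search
-- over a precomputed sorted key table; same results on every input.

-- ===== PORT A =====

-- sport_abrev_to_formal_name (module constant, as an association list in insertion order)
def pvAbrevToFormal : List (String × String) :=
  [("hky", "Hockey"), ("bball", "Basketball"), ("soc", "Soccer"), ("baseb", "Baseball"),
   ("softb", "Softball"), ("lax", "Lacrosse"), ("fb", "Football"), ("fhky", "Field Hockey")]

-- strip_escape: string.lstrip(":").strip()  (lstrip(":") ported by hand as dropWhile on ':' — exact)
def pvStripEscape (s : String) : String :=
  String.ofList (PySem.Chars.strip (s.toList.dropWhile (fun c => c == ':')))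

-- isescaped: string.startswith(":")
def pvIsescaped (s : String) : Bool := PySem.Str.startswith s ":"

-- matchify: "".join(map(str.lower, string.split()))
def pvMatchify (s : String) : String :=
  String.ofList (PySem.Chars.join [] ((PySem.Chars.split₀ s.toList).map PySem.Chars.lower))

-- the for/else loop over sport_abrev_to_formal_name.items()
-- ('matchable in {abbrev, matchify(full_name)}' — membership in the 2-element set literal ported as the disjunction, exact)
def pvLoopA (matchable : String) : List (String × String) → Option String
  | [] => none
  | (abbr, full_name) :: rest =>
      if matchable == abbr || matchable == pvMatchify full_name then some full_name
      else pvLoopA matchable rest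

def normalize_sports (sport : String) : Option String :=
  if pvIsescaped sport then some (":" ++ pvStripEscape sport)
  else pvLoopA (pvMatchify sport) pvAbrevToFormal

-- ===== PORT B =====

-- _table (module constant, sorted by key)
def pvTable : List (String × String) :=
  [("baseb", "Baseball"), ("baseball", "Baseball"), ("basketball", "Basketball"),
   ("bball", "Basketball"), ("fb", "Football"), ("fhky", "Field Hockey"),
   ("fieldhockey", "Field Hockey"), ("football", "Football"), ("hky", "Hockey"),
   ("hockey", "Hockey"), ("lacrosse", "Lacrosse"), ("lax", "Lacrosse"),
   ("soc", "Soccer"), ("soccer", "Soccer"), ("softb", "Softball"),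
   ("softball", "Softball")]

-- Python's 'm < key' on strings, ported by hand: lexicographic comparison of the
-- character lists by code point — exact for Python's string '<'
def pvStrLt : List Char → List Char → Bool
  | [], [] => false
  | [], _ :: _ => true
  | _ :: _, [] => false
  | a :: as, b :: bs => if a < b then true else if b < a then false else pvStrLt as bs

-- _bsearch(m, lo, hi): recursive binary search; the extra fuel argument only makes
-- the same computation total (fuel = table length ≥ recursion depth; never exhausted)
def pvBsearch (m : String) : Nat → Nat → Nat → Option String
  | 0, _, _ => none
  | fuel + 1, lo, hi =>
      if hi ≤ lo then none
      else
        match pvTable[(lo + hi) / 2]? with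
        | none => none   -- unreachable: mid is always in range
        | some (key, name) =>
            if m == key then some name
            else if pvStrLt m.toList key.toList then pvBsearch m fuel lo ((lo + hi) / 2)
            else pvBsearch m fuel ((lo + hi) / 2 + 1) hi

def normalize_sports_alt (sport : String) : Option String :=
  if PySem.Str.startswith sport ":" then
    -- ":" + sport.lstrip(":").strip()   (lstrip(":") ported by hand as dropWhile on ':' — exact)
    some (":" ++ String.ofList (PySem.Chars.strip (sport.toList.dropWhile (fun c => c == ':'))))
  else
    -- _bsearch("".join(sport.split()).lower(), 0, len(_table))
    pvBsearch (String.ofList (PySem.Chars.lower (PySem.Chars.join [] (PySem.Chars.split₀ sport.toList))))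
      pvTable.length 0 pvTable.length

-- ===== PRECONDITION & SPEC =====
def Spec_normalize_sports (sport : String) (out : Option String) : Prop := out = normalize_sports_alt sport
instance (sport : String) (out : Option String) : Decidable (Spec_normalize_sports sport out) := by unfold Spec_normalize_sports; infer_instance

-- ===== CLAIM (what is proved, stated in full; the proofs are below) =====
def Claim_equal_normalize_sports : Prop := ∀ (sport : String), Dom_normalize_sports sport → Spec_normalize_sports sport (normalize_sports sport)

-- ===== LEMMAS AND PROOFS =====

-- A's matchify (lower each word, then join) equals B's (join the words, then lower).
theorem pv_matchify_eq (s : String) :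
    pvMatchify s = String.ofList (PySem.Chars.lower (PySem.Chars.join [] (PySem.Chars.split₀ s.toList))) := by
  have hjoin : ∀ xss : List (List Char), PySem.Chars.join [] xss = xss.flatten := by
    intro xss
    induction xss with
    | nil => rfl
    | cons x xs ih => cases xs <;> simp_all [PySem.Chars.join_cons_cons, PySem.Chars.join_singleton]
  simp [pvMatchify, hjoin,
        show PySem.Chars.lower = List.map PySem.Chars.lowerChar from funext fun _ => rfl,
        List.map_flatten]

-- A's scan over the 8 entries agrees with B's binary search in the sorted 16-key table, for every query.
theorem pv_scan_eq_bsearch (m : String) :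
    pvLoopA m pvAbrevToFormal = pvBsearch m pvTable.length 0 pvTable.length := by
  by_cases h1 : m = "hky"; · subst h1; decide
  by_cases h2 : m = "hockey"; · subst h2; decide
  by_cases h3 : m = "bball"; · subst h3; decide
  by_cases h4 : m = "basketball"; · subst h4; decide
  by_cases h5 : m = "soc"; · subst h5; decide
  by_cases h6 : m = "soccer"; · subst h6; decide
  by_cases h7 : m = "baseb"; · subst h7; decide
  by_cases h8 : m = "baseball"; · subst h8; decide
  by_cases h9 : m = "softb"; · subst h9; decide
  by_cases h10 : m = "softball"; · subst h10; decide
  by_cases h11 : m = "lax"; · subst h11; decide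
  by_cases h12 : m = "lacrosse"; · subst h12; decide
  by_cases h13 : m = "fb"; · subst h13; decide
  by_cases h14 : m = "football"; · subst h14; decide
  by_cases h15 : m = "fhky"; · subst h15; decide
  by_cases h16 : m = "fieldhockey"; · subst h16; decide
  have e1 : (m == "hky") = false := beq_eq_false_iff_ne.mpr h1
  have e2 : (m == "hockey") = false := beq_eq_false_iff_ne.mpr h2
  have e3 : (m == "bball") = false := beq_eq_false_iff_ne.mpr h3
  have e4 : (m == "basketball") = false := beq_eq_false_iff_ne.mpr h4
  have e5 : (m == "soc") = false := beq_eq_false_iff_ne.mpr h5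
  have e6 : (m == "soccer") = false := beq_eq_false_iff_ne.mpr h6
  have e7 : (m == "baseb") = false := beq_eq_false_iff_ne.mpr h7
  have e8 : (m == "baseball") = false := beq_eq_false_iff_ne.mpr h8
  have e9 : (m == "softb") = false := beq_eq_false_iff_ne.mpr h9
  have e10 : (m == "softball") = false := beq_eq_false_iff_ne.mpr h10
  have e11 : (m == "lax") = false := beq_eq_false_iff_ne.mpr h11
  have e12 : (m == "lacrosse") = false := beq_eq_false_iff_ne.mpr h12
  have e13 : (m == "fb") = false := beq_eq_false_iff_ne.mpr h13
  have e14 : (m == "football") = false := beq_eq_false_iff_ne.mpr h14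
  have e15 : (m == "fhky") = false := beq_eq_false_iff_ne.mpr h15
  have e16 : (m == "fieldhockey") = false := beq_eq_false_iff_ne.mpr h16
  have hA : pvLoopA m pvAbrevToFormal = none := by
    simp [pvLoopA, pvAbrevToFormal,
          e1, e2, e3, e4, e5, e6, e7, e8, e9, e10, e11, e12, e13, e14, e15, e16,
          show pvMatchify "Hockey" = "hockey" from by decide,
          show pvMatchify "Basketball" = "basketball" from by decide,
          show pvMatchify "Soccer" = "soccer" from by decide,
          show pvMatchify "Baseball" = "baseball" from by decide,
          show pvMatchify "Softball" = "softball" from by decide,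
          show pvMatchify "Lacrosse" = "lacrosse" from by decide,
          show pvMatchify "Football" = "football" from by decide,
          show pvMatchify "Field Hockey" = "fieldhockey" from by decide]
  have hB : pvBsearch m pvTable.length 0 pvTable.length = none := by
    show pvBsearch m 16 0 16 = none
    simp [pvBsearch, pvTable,
          e1, e2, e3, e4, e5, e6, e7, e8, e9, e10, e11, e12, e13, e14, e15, e16]
  rw [hA, hB]

-- ===== VERDICT (by name: the statement is the Claim_ definition above) =====
theorem normalize_sports_spec : Claim_equal_normalize_sports := by
  intro sport _
  unfold Spec_normalize_sports normalize_sports normalize_sports_alt pvIsescaped pvStripEscape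
  rw [pv_scan_eq_bsearch, pv_matchify_eq]
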